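-- pv_equiv track=rewrite | github.com/MhmdShd/AlgorithmsSimulation | Alogs.py | getColorheap
-- ===== SOURCE A (Python) =====
-- def getColorheap(datalen, I, large, l, r):
--     color = []
--     for i in range(datalen):
--         if i <= datalen:
--             color.append("grey")
--         else:
--             color.append("white")
--         if i == I:
--             color[i] = 'green'
--         if i == l:
--             color[i] = 'blue'
--         if i == r:
--             color[i] = 'yellow'
--     return color
-- ===== SOURCE B (Python) =====
-- def getColorheap(datalen, I, large, l, r):
--     # fill-then-mark: one-shot grey background, then direct indexed marks
--     # in priority order (yellow over blue over green on coinciding indices)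
--     color = ["grey"] * max(datalen, 0)
--     if 0 <= I < datalen:
--         color[I] = 'green'
--     if 0 <= l < datalen:
--         color[l] = 'blue'
--     if 0 <= r < datalen:
--         color[r] = 'yellow'
--     return color
-- ===== Notes on version B (the rewrite author's own statement) =====
-- stated objective: simpler
-- what changed: Replaces the per-element build loop with its sequential append and three in-loop conditional overwrites by a one-shot grey background list plus three direct bounds-guarded indexed assignments (green, blue, yellow in overwrite order).
import Mathlib
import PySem

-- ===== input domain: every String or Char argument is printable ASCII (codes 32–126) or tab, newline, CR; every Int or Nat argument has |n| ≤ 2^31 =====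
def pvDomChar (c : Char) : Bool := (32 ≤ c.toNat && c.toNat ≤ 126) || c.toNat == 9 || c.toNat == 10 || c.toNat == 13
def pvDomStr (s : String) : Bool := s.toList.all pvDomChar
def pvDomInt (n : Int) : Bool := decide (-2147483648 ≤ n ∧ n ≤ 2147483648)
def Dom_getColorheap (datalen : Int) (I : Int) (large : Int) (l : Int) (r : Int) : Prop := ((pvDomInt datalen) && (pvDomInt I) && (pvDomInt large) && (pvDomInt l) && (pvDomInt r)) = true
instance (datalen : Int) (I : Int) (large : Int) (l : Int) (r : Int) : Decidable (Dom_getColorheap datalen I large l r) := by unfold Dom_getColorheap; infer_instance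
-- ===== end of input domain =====

-- B replaces A's per-element build loop (append + three in-loop conditional
-- overwrites) by a one-shot grey background plus three bounds-guarded direct
-- indexed assignments; objective: simpler.


-- ===== PORT A =====
-- loop indices i come from range(datalen), hence 0 ≤ i, so Python's
-- color[i] = … (index already in range) is List.set i.toNat (exact here)
def getColorheap (datalen : Int) (I : Int) (large : Int) (l : Int) (r : Int) : List String :=
  (PySem.List.pyRange 0 datalen 1).foldl (fun color i =>
    let color := if i ≤ datalen then color ++ ["grey"] else color ++ ["white"]
    let color := if i = I then color.set i.toNat "green" else color
    let color := if i = l then color.set i.toNat "blue" else color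
    if i = r then color.set i.toNat "yellow" else color) []

-- ===== PORT B =====
-- ["grey"] * max(datalen, 0) is List.replicate; each guarded color[idx] = c
-- has 0 ≤ idx, so it is List.set idx.toNat (exact here)
def getColorheap_alt (datalen : Int) (I : Int) (large : Int) (l : Int) (r : Int) : List String :=
  let color := List.replicate (max datalen 0).toNat "grey"
  let color := if 0 ≤ I ∧ I < datalen then color.set I.toNat "green" else color
  let color := if 0 ≤ l ∧ l < datalen then color.set l.toNat "blue" else color
  if 0 ≤ r ∧ r < datalen then color.set r.toNat "yellow" else color

-- ===== PRECONDITION & SPEC =====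
def Spec_getColorheap (datalen : Int) (I : Int) (large : Int) (l : Int) (r : Int) (out : List String) : Prop := out = getColorheap_alt datalen I large l r
instance (datalen : Int) (I : Int) (large : Int) (l : Int) (r : Int) (out : List String) : Decidable (Spec_getColorheap datalen I large l r out) := by unfold Spec_getColorheap; infer_instance

-- ===== CLAIM (what is proved, stated in full; the proofs are below) =====
def Claim_equal_getColorheap : Prop := ∀ (datalen : Int) (I : Int) (large : Int) (l : Int) (r : Int), Dom_getColorheap datalen I large l r → Spec_getColorheap datalen I large l r (getColorheap datalen I large l r)

-- ===== LEMMAS AND PROOFS =====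

-- the colour both programs give position k
def pvColorAt (I l r : Int) (k : Nat) : String :=
  if (k : Int) = r then "yellow" else if (k : Int) = l then "blue"
  else if (k : Int) = I then "green" else "grey"

theorem pv_loopA (datalen I l r : Int) (n : Nat) (h : n = 0 ∨ (n : Int) ≤ datalen) :
    ((List.range n).map (fun k : Nat => (0 : Int) + (k : Int))).foldl (fun color i =>
      let color := if i ≤ datalen then color ++ ["grey"] else color ++ ["white"]
      let color := if i = I then color.set i.toNat "green" else color
      let color := if i = l then color.set i.toNat "blue" else color
      if i = r then color.set i.toNat "yellow" else color) []
    = (List.range n).map (pvColorAt I l r) := by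
  induction n with
  | zero => rfl
  | succ m ih =>
    have hd : (m : Int) + 1 ≤ datalen := by
      rcases h with h | h
      · omega
      · push_cast at h; omega
    rw [List.range_succ, List.map_append, List.map_append, List.foldl_append,
      ih (Or.inr (by omega))]
    simp only [List.map_cons, List.map_nil, List.foldl_cons, List.foldl_nil, zero_add]
    have htn : ((m : Int)).toNat = m := by omega
    have hle : (m : Int) ≤ datalen := by omega
    rw [if_pos hle]
    simp only [htn]
    clear ih h
    split_ifs <;> simp_all [pvColorAt]

theorem pv_altB (datalen I large l r : Int) :
    getColorheap_alt datalen I large l r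
      = (List.range datalen.toNat).map (pvColorAt I l r) := by
  unfold getColorheap_alt
  have hmax : (max datalen 0).toNat = datalen.toNat := by omega
  rw [hmax]
  apply List.ext_getElem
  · simp only [List.length_map, List.length_range]
    split_ifs <;> simp
  · intro k hk hk'
    simp only [List.length_map, List.length_range] at hk'
    simp only [List.getElem_map, List.getElem_range]
    unfold pvColorAt
    split_ifs <;>
      simp only [List.getElem_set, List.getElem_replicate] <;>
      split_ifs <;> first | rfl | omega

theorem pv_A_eq (datalen I large l r : Int) :
    getColorheap datalen I large l r = (List.range datalen.toNat).map (pvColorAt I l r) := by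
  unfold getColorheap
  rw [PySem.List.pyRange_one]
  simp only [Int.sub_zero]
  exact pv_loopA datalen I l r datalen.toNat (by omega)

-- ===== VERDICT (by name: the statement is the Claim_ definition above) =====
theorem getColorheap_spec : Claim_equal_getColorheap := by
  intro datalen I large l r _
  unfold Spec_getColorheap
  rw [pv_A_eq, pv_altB]
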